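-- pv_equiv track=rewrite | github.com/programminglounge/HackerRank | maxfunction.py | my_custom_max
-- ===== SOURCE A (Python) =====
-- def my_custom_max (x, modulo, modulo1):
--   y = []
--   my_max = -1
--   for i in range (len(x[0])):
--     result_modulo = x[0][i] % modulo
--     y.append(result_modulo)
--   y.sort()
--   for i in range (len(y)):
--     if (y[i] < modulo1):
--       my_max = y[i]
--     else:
--       break
--   return my_max
-- ===== SOURCE B (Python) =====
-- def my_custom_max(x, modulo, modulo1):
--     return max((e % modulo for e in x[0] if e % modulo < modulo1), default=-1)
-- ===== Notes on version B (the rewrite author's own statement) =====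
-- stated objective: idiomatic
-- what changed: Replaces the append-loop, in-place sort and linear scan-with-break by a single generator expression: B takes the max of the modded values strictly below modulo1 with default -1, with no sort at all. Pre_ excludes modulo = 0 (ZeroDivisionError in general); when the row is empty the loop never divides and both still return -1.
-- outside the precondition, e.g. on my_custom_max([[]], 0, 5): A returns -1, B returns -1
import Mathlib
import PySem

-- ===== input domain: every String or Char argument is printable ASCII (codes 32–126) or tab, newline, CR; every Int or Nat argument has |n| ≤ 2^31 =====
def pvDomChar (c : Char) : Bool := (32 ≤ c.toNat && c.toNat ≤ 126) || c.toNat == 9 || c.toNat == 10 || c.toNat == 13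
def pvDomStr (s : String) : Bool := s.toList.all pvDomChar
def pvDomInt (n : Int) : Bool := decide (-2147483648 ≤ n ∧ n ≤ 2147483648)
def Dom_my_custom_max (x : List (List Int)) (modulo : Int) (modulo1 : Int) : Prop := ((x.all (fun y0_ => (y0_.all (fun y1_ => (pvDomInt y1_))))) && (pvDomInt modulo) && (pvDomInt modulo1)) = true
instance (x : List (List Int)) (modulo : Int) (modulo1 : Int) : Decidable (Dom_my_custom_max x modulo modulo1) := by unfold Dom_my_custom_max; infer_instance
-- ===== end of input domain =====

-- B replaces A's append-loop, sort and linear scan-with-break by one pass: the max of the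
-- modded values strictly below modulo1, with default -1 (objective: more idiomatic, no sort).


-- ===== PORT A =====
-- the second loop: my_max := y[i] while y[i] < modulo1, break at the first y[i] ≥ modulo1
def my_custom_max_scan (myMax : Int) (modulo1 : Int) : List Int → Int
  | [] => myMax
  | v :: t => if v < modulo1 then my_custom_max_scan v modulo1 t else myMax

def my_custom_max (x : List (List Int)) (modulo : Int) (modulo1 : Int) : Int :=
  match x with
  | [] => -1  -- unreachable under Pre_: Python's x[0] raises IndexError here
  | row :: _ =>
    let y := row.map (fun e => PySem.Int.mod e modulo)
    let ys := PySem.List.sorted y (fun v => v) false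
    my_custom_max_scan (-1) modulo1 ys

-- ===== PORT B =====
def my_custom_max_alt (x : List (List Int)) (modulo : Int) (modulo1 : Int) : Int :=
  match x with
  | [] => -1  -- unreachable under Pre_: Python's x[0] raises IndexError here
  | row :: _ =>
    PySem.List.maxD
      ((row.map (fun e => PySem.Int.mod e modulo)).filter (fun v => decide (v < modulo1)))
      (fun v => v) (-1)

-- ===== PRECONDITION & SPEC =====
-- Pre_ excludes the inputs where Python A raises: x = [] (IndexError on x[0]) and
-- modulo = 0 (ZeroDivisionError on %); with modulo = 0 and an EMPTY first row the loop
-- never divides and both programs still return -1, so Pre_ is marginally narrower there.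
def Pre_my_custom_max (x : List (List Int)) (modulo : Int) (modulo1 : Int) : Prop :=
  x ≠ [] ∧ modulo ≠ 0
instance (x : List (List Int)) (modulo : Int) (modulo1 : Int) : Decidable (Pre_my_custom_max x modulo modulo1) := by unfold Pre_my_custom_max; infer_instance

def pvWitness_my_custom_max : List (List Int) × Int × Int := ([[3, 5]], 4, 2)

def Spec_my_custom_max (x : List (List Int)) (modulo : Int) (modulo1 : Int) (out : Int) : Prop := out = my_custom_max_alt x modulo modulo1
instance (x : List (List Int)) (modulo : Int) (modulo1 : Int) (out : Int) : Decidable (Spec_my_custom_max x modulo modulo1 out) := by unfold Spec_my_custom_max; infer_instance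

-- ===== CLAIM (what is proved, stated in full; the proofs are below) =====
def Claim_equal_my_custom_max : Prop := ∀ (x : List (List Int)) (modulo : Int) (modulo1 : Int), Dom_my_custom_max x modulo modulo1 → Pre_my_custom_max x modulo modulo1 → Spec_my_custom_max x modulo modulo1 (my_custom_max x modulo modulo1)

-- ===== LEMMAS AND PROOFS =====

-- the value of max?, key = id, is invariant under permutation
theorem max?_id_perm {l l' : List Int} (h : l.Perm l') :
    PySem.List.max? l (fun v => v) = PySem.List.max? l' (fun v => v) := by
  rcases hl : PySem.List.max? l (fun v => v) with _ | m
  · rw [PySem.List.max?_eq_none_iff] at hl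
    subst hl
    rw [eq_comm, PySem.List.max?_eq_none_iff]
    exact h.symm.eq_nil
  · rcases hl' : PySem.List.max? l' (fun v => v) with _ | m'
    · rw [PySem.List.max?_eq_none_iff] at hl'
      subst hl'
      have : l = [] := h.eq_nil
      simp [this, PySem.List.max?] at hl
    · have hm : m ∈ l := PySem.List.max?_mem hl
      have hm' : m' ∈ l' := PySem.List.max?_mem hl'
      have h1 : m' ≤ m := PySem.List.max?_isMax hl m' (h.mem_iff.mpr hm')
      have h2 : m ≤ m' := PySem.List.max?_isMax hl' m (h.mem_iff.mp hm)
      simp [le_antisymm h1 h2]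

-- A's scan-with-break on an ascending list computes max-with-default of the values < modulo1
theorem scan_eq_maxD (modulo1 : Int) (l : List Int) (hs : l.Pairwise (· ≤ ·)) :
    ∀ a : Int, my_custom_max_scan a modulo1 l =
      (PySem.List.max? (l.filter (fun v => decide (v < modulo1))) (fun v => v)).getD a := by
  induction l with
  | nil => intro a; simp [my_custom_max_scan, PySem.List.max?]
  | cons v t ih =>
    intro a
    rcases List.pairwise_cons.mp hs with ⟨hv, ht⟩
    by_cases hlt : v < modulo1
    · have hfil : (v :: t).filter (fun v => decide (v < modulo1)) =
          v :: t.filter (fun v => decide (v < modulo1)) := by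
        simp [hlt]
      rw [hfil]
      simp only [my_custom_max_scan, if_pos hlt]
      rw [ih ht v]
      rcases hft : t.filter (fun v => decide (v < modulo1)) with _ | ⟨w, t'⟩
      · simp [PySem.List.max?]
      · have hw : w ∈ t := by
          have : w ∈ t.filter (fun v => decide (v < modulo1)) := by simp [hft]
          exact List.mem_of_mem_filter this
        have hvw : v ≤ w := hv w hw
        rw [PySem.List.max?_id_cons, PySem.List.max?_id_cons]
        simp [List.foldl_cons, max_eq_right hvw]
    · have hfil : (v :: t).filter (fun v => decide (v < modulo1)) = [] := by
        rw [List.filter_cons]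
        simp only [hlt, decide_false, if_false, Bool.false_eq_true]
        rw [List.filter_eq_nil_iff]
        intro y hy
        have : v ≤ y := hv y hy
        simp; omega
      rw [hfil]
      simp [my_custom_max_scan, hlt, PySem.List.max?]

-- ===== VERDICT (by name: the statement is the Claim_ definition above) =====
theorem my_custom_max_spec : Claim_equal_my_custom_max := by
  intro x modulo modulo1 _ hpre
  unfold Spec_my_custom_max my_custom_max my_custom_max_alt
  match x with
  | [] => exact absurd rfl hpre.1
  | row :: _ =>
    simp only
    set mods := row.map (fun e => PySem.Int.mod e modulo) with hmods
    have hpair : (PySem.List.sorted mods (fun v => v) false).Pairwise (· ≤ ·) :=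
      PySem.List.sorted_pairwise mods (fun v => v)
    rw [scan_eq_maxD modulo1 _ hpair (-1)]
    have hperm : ((PySem.List.sorted mods (fun v => v) false).filter
        (fun v => decide (v < modulo1))).Perm
        (mods.filter (fun v => decide (v < modulo1))) :=
      (PySem.List.sorted_perm mods (fun v => v) false).filter _
    rw [max?_id_perm hperm]
    rfl
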